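-- pv_equiv track=rewrite | github.com/markus-flicke/face_recognition | code/src/FaceRecogniser/FaceNet/utils.py | get_top3_predictions
-- ===== SOURCE A (Python) =====
-- from operator import itemgetter
--
-- def get_top3_predictions(dist, name):
--     top = []
--     for row in dist:
--         dist_class = zip(row, name)
--         dist_class = sorted(dist_class, key=itemgetter(0))
--         class_name = dist_class[0][1]
--         top1 = dist_class[1][1]
--         top2 = dist_class[2][1]
--         top3 = dist_class[3][1]
--         top.append((class_name, [top1, top2, top3]))
--
--     return top
-- ===== SOURCE B (Python) =====
-- from operator import itemgetter
--
-- def get_top3_predictions(dist, name):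
--     top = []
--     for row in dist:
--         pairs = list(zip(row, name))
--         prefix = []
--         while pairs and len(prefix) < 4:
--             m = min(pairs, key=itemgetter(0))
--             pairs.remove(m)
--             prefix.append(m)
--         top.append((prefix[0][1], [prefix[1][1], prefix[2][1], prefix[3][1]]))
--     return top
-- ===== Notes on version B (the rewrite author's own statement) =====
-- stated objective: alternative
-- what changed: Replaces the full stable sort of each row's (distance, name) pairs by a k=4 partial selection: repeatedly scan for the first minimum-distance pair, remove it, and collect four of them.
import Mathlib
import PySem

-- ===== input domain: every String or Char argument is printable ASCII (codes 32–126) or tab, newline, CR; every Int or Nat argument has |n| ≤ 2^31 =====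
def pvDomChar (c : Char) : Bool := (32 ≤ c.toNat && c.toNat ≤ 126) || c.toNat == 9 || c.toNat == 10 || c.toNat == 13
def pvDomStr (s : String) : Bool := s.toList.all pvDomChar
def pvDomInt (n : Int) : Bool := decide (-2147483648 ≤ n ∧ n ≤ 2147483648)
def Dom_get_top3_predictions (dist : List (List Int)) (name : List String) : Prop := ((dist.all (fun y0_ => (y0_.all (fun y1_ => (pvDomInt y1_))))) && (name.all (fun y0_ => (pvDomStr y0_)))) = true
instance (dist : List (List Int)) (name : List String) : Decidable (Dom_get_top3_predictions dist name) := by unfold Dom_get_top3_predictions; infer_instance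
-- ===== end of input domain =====

-- B replaces A's full stable sort per row by a k=4 partial selection (repeated first-min
-- extraction); objective: alternative algorithm, same exact output.

-- ===== PORT A =====
-- Port of A: per row, sort the zipped (distance, name) pairs by distance (Python's stable
-- sort, key=itemgetter(0)) and read entries 0..3.  Python raises IndexError when a row
-- yields fewer than 4 pairs; Pre_ below excludes exactly those inputs, so the pyGetD
-- default (0, "") is never read under Pre_.
def get_top3_predictions (dist : List (List Int)) (name : List String) : List (String × List String) :=
  dist.foldl (fun top row =>
    let dist_class := PySem.List.sorted (row.zip name) (fun p => p.1) false
    top ++ [((PySem.List.pyGetD dist_class 0 (0, "")).2,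
             [(PySem.List.pyGetD dist_class 1 (0, "")).2,
              (PySem.List.pyGetD dist_class 2 (0, "")).2,
              (PySem.List.pyGetD dist_class 3 (0, "")).2])]) []

-- ===== PORT B =====
-- B's while loop: at most n = 4 extractions, stopping early when pairs runs out.
-- min(pairs, key=itemgetter(0)) is PySem.List.min? (first minimum); pairs.remove(m) is
-- PySem.List.remove? (erase first occurrence).  The none branches are unreachable: the
-- loop guard guarantees pairs ≠ [], and the removed element is the min, a member.
def pvSelect (n : Nat) (pairs : List (Int × String)) : List (Int × String) :=
  match n, pairs with
  | 0, _ => []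
  | _ + 1, [] => []
  | n + 1, p :: ps =>
    match PySem.List.min? (p :: ps) (fun q => q.1) with
    | none => []
    | some m =>
      match PySem.List.remove? (p :: ps) m with
      | none => []
      | some rest => m :: pvSelect n rest

-- as in A, the pyGetD default is never read under Pre_ (prefix has 4 elements there)
def get_top3_predictions_alt (dist : List (List Int)) (name : List String) : List (String × List String) :=
  dist.foldl (fun top row =>
    let pre := pvSelect 4 (row.zip name)
    top ++ [((PySem.List.pyGetD pre 0 (0, "")).2,
             [(PySem.List.pyGetD pre 1 (0, "")).2,
              (PySem.List.pyGetD pre 2 (0, "")).2,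
              (PySem.List.pyGetD pre 3 (0, "")).2])]) []

-- ===== PRECONDITION & SPEC =====
-- Pre_ excludes exactly the inputs where Python A raises IndexError: a row whose zip with
-- name has fewer than 4 pairs (dist_class[3] does not exist).
def Pre_get_top3_predictions (dist : List (List Int)) (name : List String) : Prop :=
  ∀ row ∈ dist, 4 ≤ (row.zip name).length
instance (dist : List (List Int)) (name : List String) : Decidable (Pre_get_top3_predictions dist name) := by unfold Pre_get_top3_predictions; infer_instance

def pvWitness_get_top3_predictions : List (List Int) × List String :=
  ([[3, 1, 2, 1, 5]], ["a", "b", "c", "d", "e"])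

def Spec_get_top3_predictions (dist : List (List Int)) (name : List String) (out : List (String × List String)) : Prop := out = get_top3_predictions_alt dist name
instance (dist : List (List Int)) (name : List String) (out : List (String × List String)) : Decidable (Spec_get_top3_predictions dist name out) := by unfold Spec_get_top3_predictions; infer_instance

-- ===== CLAIM (what is proved, stated in full; the proofs are below) =====
def Claim_equal_get_top3_predictions : Prop := ∀ (dist : List (List Int)) (name : List String), Dom_get_top3_predictions dist name → Pre_get_top3_predictions dist name → Spec_get_top3_predictions dist name (get_top3_predictions dist name)

-- ===== LEMMAS AND PROOFS =====

-- Extraction lemma: a nonempty list's stable sort by first component is its first minimum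
-- followed by the stable sort of the list with that first occurrence removed.
theorem pv_sorted_extract (xs : List (Int × String)) (hx : xs ≠ []) :
    ∃ m rest, PySem.List.min? xs (fun q => q.1) = some m ∧
      PySem.List.remove? xs m = some rest ∧
      PySem.List.sorted xs (fun q => q.1) false =
        m :: PySem.List.sorted rest (fun q => q.1) false := by
  induction xs using List.reverseRecOn with
  | nil => exact absurd rfl hx
  | append_singleton xs x ih =>
    by_cases hxs : xs = []
    · subst hxs
      refine ⟨x, [], ?_, ?_, ?_⟩ <;>
        simp [PySem.List.min?, PySem.List.remove?, PySem.List.sorted, PySem.List.insertBy]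
    · obtain ⟨m, rest, hmin, hrem, hsort⟩ := ih hxs
      have hm_mem := PySem.List.min?_mem hmin
      have hm_min := PySem.List.min?_isMin hmin
      obtain ⟨k, hk⟩ : ∃ k, List.idxOf? m xs = some k := by
        simp only [PySem.List.remove?] at hrem
        cases h : List.idxOf? m xs with
        | none => rw [h] at hrem; simp at hrem
        | some k => exact ⟨k, rfl⟩
      have hrest : rest = xs.eraseIdx k := by
        simp only [PySem.List.remove?, hk] at hrem
        simpa using hrem.symm
      have hsortapp : ∀ (ys : List (Int × String)),
          PySem.List.sorted (ys ++ [x]) (fun q => q.1) false =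
            PySem.List.insertBy (fun a b => decide (a.1 < b.1)) x
              (PySem.List.sorted ys (fun q => q.1) false) := by
        intro ys
        rw [PySem.List.sorted_eq_foldl_insertBy, PySem.List.sorted_eq_foldl_insertBy,
          List.foldl_append]
        simp
      have hminapp : PySem.List.min? (xs ++ [x]) (fun q => q.1) =
          (if x.1 < m.1 then some x else some m) := by
        simp only [PySem.List.min?] at hmin ⊢
        rw [List.foldl_append, hmin]
        simp
      by_cases hlt : x.1 < m.1
      · refine ⟨x, xs, ?_, ?_, ?_⟩
        · rw [hminapp]; simp [hlt]
        · have hxnot : x ∉ xs := fun hin => absurd (hm_min x hin) (by omega)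
          have hidx := PySem.List.index?_append_singleton_self xs x hxnot
          rw [PySem.List.index?_eq_idxOf?] at hidx
          simp [PySem.List.remove?, hidx,
            List.eraseIdx_append_of_length_le (le_refl xs.length)]
        · rw [hsortapp xs, hsort]
          simp [PySem.List.insertBy, hlt]
      · refine ⟨m, rest ++ [x], ?_, ?_, ?_⟩
        · rw [hminapp]; simp [hlt]
        · have hidx : PySem.List.index? (xs ++ [x]) m = some k := by
            rw [PySem.List.index?_append_of_mem [x] hm_mem,
              PySem.List.index?_eq_idxOf?, hk]
          rw [PySem.List.index?_eq_idxOf?] at hidx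
          have hkl : k < xs.length := by
            have h := List.idxOf?_eq_some_iff.mp hk
            exact h.1
          simp [PySem.List.remove?, hidx, List.eraseIdx_append_of_lt_length hkl, hrest]
        · rw [hsortapp xs, hsort, hsortapp rest]
          simp [PySem.List.insertBy, hlt]

-- The selection loop computes exactly the first n entries of A's sorted list.
theorem pvSelect_eq_take (n : Nat) (xs : List (Int × String)) :
    pvSelect n xs = (PySem.List.sorted xs (fun q => q.1) false).take n := by
  induction n generalizing xs with
  | zero => simp [pvSelect]
  | succ n ih =>
    cases xs with
    | nil => simp [pvSelect, PySem.List.sorted]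
    | cons p ps =>
      obtain ⟨m, rest, hmin, hrem, hsort⟩ := pv_sorted_extract (p :: ps) (by simp)
      simp [pvSelect, hmin, hrem, hsort, ih]

-- pyGetD at 0..3 sees only the first four elements.
theorem pv_take4_getD (l : List (Int × String)) (h : 4 ≤ l.length) (i : Int)
    (hi : 0 ≤ i ∧ i < 4) (d : Int × String) :
    PySem.List.pyGetD (l.take 4) i d = PySem.List.pyGetD l i d := by
  rcases l with _ | ⟨a, _ | ⟨b, _ | ⟨c, _ | ⟨e, t⟩⟩⟩⟩ <;> simp at h
  obtain ⟨hi0, hi4⟩ := hi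
  interval_cases i <;> simp [PySem.List.pyGetD_ofNat']

-- ===== VERDICT (by name: the statement is the Claim_ definition above) =====
theorem get_top3_predictions_spec : Claim_equal_get_top3_predictions := by
  intro dist name _ hpre
  unfold Spec_get_top3_predictions
  unfold get_top3_predictions get_top3_predictions_alt
  refine (PySem.List.foldl_congr_mem' dist _ _ [] ?_).symm
  intro row hrow acc
  have hlen : 4 ≤ (row.zip name).length := hpre row hrow
  have hslen : 4 ≤ (PySem.List.sorted (row.zip name) (fun q => q.1) false).length := by
    rw [PySem.List.length_sorted]; exact hlen
  simp only [pvSelect_eq_take]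
  rw [pv_take4_getD _ hslen 0 (by omega), pv_take4_getD _ hslen 1 (by omega),
    pv_take4_getD _ hslen 2 (by omega), pv_take4_getD _ hslen 3 (by omega)]
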